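-- pv_equiv track=rewrite | github.com/rozennrd/ProjectEuler | 68 - Magic 5-gon ring.py | get_is_sol
-- ===== SOURCE A (Python) =====
-- def get_is_sol(lst):
--     """Function returning the list that is a solution, in the right order"""
--     ind = 2 # index
--     a, b, c = lst[0], lst[1], lst[2]
--     tot = a + b + c
--     lst_sol = [[a, b, c]]
--     while ind <= len(lst) - 2:
--         a, b = lst[ind+1], c
--         if ind + 2 < len(lst):
--             c = lst[ind+2]
--         else :
--             c = lst[1]
--         ind += 2
--         if a + b + c != tot:
--             return None
--         else :
--             lst_sol.append([a, b, c])
--     return lst_sol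
-- ===== SOURCE B (Python) =====
-- def get_is_sol(lst):
--     """Function returning the list that is a solution, in the right order"""
--     n = len(lst)
--     tot = lst[0] + lst[1] + lst[2]
--
--     def triple(ind):
--         # the triple A's iteration at index `ind` would produce
--         return [lst[ind + 1], lst[ind], lst[ind + 2] if ind + 2 < n else lst[1]]
--
--     def solve(lo, k):
--         # triples for the k iterations starting at index lo (step 2),
--         # by divide and conquer; None if any of them has a wrong sum
--         if k == 0:
--             return []
--         if k == 1:
--             t = triple(lo)
--             return [t] if sum(t) == tot else None
--         h = k // 2
--         left = solve(lo, h)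
--         if left is None:
--             return None
--         right = solve(lo + 2 * h, k - h)
--         return None if right is None else left + right
--
--     rest = solve(2, (n - 2) // 2)
--     return None if rest is None else [[lst[0], lst[1], lst[2]]] + rest
-- ===== Notes on version B (the rewrite author's own statement) =====
-- stated objective: alternative
-- what changed: A walks the list sequentially with a stateful while-loop (mutating a,b,c and an index); B extracts each triple independently by a closed index formula and validates/assembles the triple list by divide-and-conquer recursion over the iteration range, halving the range at each level.
import Mathlib
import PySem

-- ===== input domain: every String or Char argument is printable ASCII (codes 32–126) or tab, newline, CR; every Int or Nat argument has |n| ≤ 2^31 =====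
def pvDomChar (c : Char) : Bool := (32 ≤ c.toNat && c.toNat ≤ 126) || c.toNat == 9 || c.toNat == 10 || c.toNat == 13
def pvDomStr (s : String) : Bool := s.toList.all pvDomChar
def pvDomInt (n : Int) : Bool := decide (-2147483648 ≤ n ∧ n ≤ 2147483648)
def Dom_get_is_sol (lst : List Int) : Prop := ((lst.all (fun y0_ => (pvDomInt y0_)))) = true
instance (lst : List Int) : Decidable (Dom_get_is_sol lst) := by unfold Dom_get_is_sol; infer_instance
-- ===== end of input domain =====

-- B replaces A's sequential stateful while-loop by a closed-form triple extraction plus a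
-- divide-and-conquer validation/assembly over the iteration range; same return value on lists of length ≥ 3.

-- ===== PORT A =====
-- the while-loop of A: state (c, lst_sol, ind); index accesses are in range for ind ≤ len-2
def get_is_sol_loop (lst : List Int) (tot c : Int) (acc : List (List Int)) (ind : Nat) :
    Option (List (List Int)) :=
  if ind + 2 ≤ lst.length then
    let a := PySem.List.pyGetD lst ((ind : Int) + 1) 0
    let b := c
    let c' := if (ind : Int) + 2 < (lst.length : Int) then PySem.List.pyGetD lst ((ind : Int) + 2) 0
              else PySem.List.pyGetD lst 1 0
    if a + b + c' ≠ tot then none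
    else get_is_sol_loop lst tot c' (acc ++ [[a, b, c']]) (ind + 2)
  else some acc
termination_by lst.length - ind

-- lst[0], lst[1], lst[2] raise IndexError for lists shorter than 3 (excluded by Pre_);
-- inside Pre_ every access is in range, so pyGetD's default is never used
def get_is_sol (lst : List Int) : Option (List (List Int)) :=
  let a := PySem.List.pyGetD lst 0 0
  let b := PySem.List.pyGetD lst 1 0
  let c := PySem.List.pyGetD lst 2 0
  let tot := a + b + c
  get_is_sol_loop lst tot c [[a, b, c]] 2

-- ===== PORT B =====
-- B's helper triple(ind): the triple of A's iteration at index ind, by a closed index formula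
def pvTriple (lst : List Int) (ind : Int) : List Int :=
  [PySem.List.pyGetD lst (ind + 1) 0, PySem.List.pyGetD lst ind 0,
   if ind + 2 < (lst.length : Int) then PySem.List.pyGetD lst (ind + 2) 0
   else PySem.List.pyGetD lst 1 0]

-- B's helper solve(lo, k): divide-and-conquer over the k iterations starting at lo (step 2);
-- the iteration count k is a Nat (inside Pre_ the Python value (n-2)//2 is nonnegative)
def pvSolve (lst : List Int) (tot : Int) (lo : Int) (k : Nat) : Option (List (List Int)) :=
  if k = 0 then some []
  else if k = 1 then
    let t := pvTriple lst lo
    if t.sum = tot then some [t] else none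
  else
    -- h = k // 2, inlined
    match pvSolve lst tot lo (k / 2) with
    | none => none
    | some left =>
      match pvSolve lst tot (lo + 2 * ((k / 2 : Nat) : Int)) (k - k / 2) with
      | none => none
      | some right => some (left ++ right)
termination_by k
decreasing_by all_goals omega

def get_is_sol_alt (lst : List Int) : Option (List (List Int)) :=
  let g : Int → Int := fun i => PySem.List.pyGetD lst i 0
  let tot := g 0 + g 1 + g 2
  match pvSolve lst tot 2 ((PySem.Int.floordiv ((lst.length : Int) - 2) 2).toNat) with
  | none => none
  | some rest => some ([g 0, g 1, g 2] :: rest)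

-- ===== PRECONDITION & SPEC =====
-- Pre_ excludes exactly the lists of length < 3, on which A raises IndexError at lst[2]
def Pre_get_is_sol (lst : List Int) : Prop := 3 ≤ lst.length
instance (lst : List Int) : Decidable (Pre_get_is_sol lst) := by unfold Pre_get_is_sol; infer_instance
def pvWitness_get_is_sol : List Int := ([1, 2, 3])

def Spec_get_is_sol (lst : List Int) (out : Option (List (List Int))) : Prop := out = get_is_sol_alt lst
instance (lst : List Int) (out : Option (List (List Int))) : Decidable (Spec_get_is_sol lst out) := by unfold Spec_get_is_sol; infer_instance

-- ===== CLAIM (what is proved, stated in full; the proofs are below) =====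
def Claim_equal_get_is_sol : Prop := ∀ (lst : List Int), Dom_get_is_sol lst → Pre_get_is_sol lst → Spec_get_is_sol lst (get_is_sol lst)

-- ===== LEMMAS AND PROOFS =====

-- the divide-and-conquer solve equals "build all k triples, then validate them"
lemma solve_eq (lst : List Int) (tot : Int) (k : Nat) (lo : Int) :
    pvSolve lst tot lo k =
      (if ((List.range k).map (fun (j : Nat) => pvTriple lst (lo + 2 * (j : Int)))).all
            (fun t => t.sum = tot)
       then some ((List.range k).map (fun (j : Nat) => pvTriple lst (lo + 2 * (j : Int))))
       else none) := by
  induction k using Nat.strong_induction_on generalizing lo with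
  | _ k ih =>
  rw [pvSolve]
  by_cases h0 : k = 0
  · subst h0; simp
  by_cases h1 : k = 1
  · subst h1
    rw [if_neg h0, if_pos rfl]
    simp [List.range_one]
  · rw [if_neg h0, if_neg h1]
    have hh : k / 2 < k := by omega
    have hk2 : k - k / 2 < k := by omega
    rw [ih (k / 2) hh lo, ih (k - k / 2) hk2 (lo + 2 * (k / 2 : Nat))]
    have hsplit : List.range k
        = List.range (k / 2) ++ (List.range (k - k / 2)).map (fun j => k / 2 + j) := by
      conv_lhs => rw [show k = k / 2 + (k - k / 2) by omega]
      rw [List.range_add]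
    have hmap : (((List.range (k - k / 2)).map (fun j => k / 2 + j)).map
          (fun (j : Nat) => pvTriple lst (lo + 2 * (j : Int))))
        = (List.range (k - k / 2)).map
            (fun (j : Nat) => pvTriple lst ((lo + 2 * ((k / 2 : Nat) : Int)) + 2 * (j : Int))) := by
      rw [List.map_map]
      apply List.map_congr_left
      intro j _
      simp only [Function.comp_apply]
      congr 1
      push_cast
      ring
    rw [hsplit, List.map_append, List.all_append, hmap]
    by_cases ha : ((List.range (k / 2)).map (fun (j : Nat) => pvTriple lst (lo + 2 * (j : Int)))).all
        (fun t => t.sum = tot) = true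
    · rw [if_pos ha, ha, Bool.true_and]
      by_cases hb : ((List.range (k - k / 2)).map
            (fun (j : Nat) => pvTriple lst ((lo + 2 * ((k / 2 : Nat) : Int)) + 2 * (j : Int)))).all
          (fun t => t.sum = tot) = true
      · rw [if_pos hb, if_pos hb]
      · rw [if_neg hb, if_neg hb]
    · rw [Bool.not_eq_true] at ha
      rw [ha, Bool.false_and]
      simp

-- A's loop equals "build the remaining triples, then validate them"
lemma loop_eq (lst : List Int) (tot : Int) (ind : Nat) (c : Int) (acc : List (List Int))
    (hc : ind + 2 ≤ lst.length → c = PySem.List.pyGetD lst (ind : Int) 0) :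
    get_is_sol_loop lst tot c acc ind =
      (let ts := (List.range ((lst.length - ind) / 2)).map
          (fun (j : Nat) => pvTriple lst ((ind : Int) + 2 * (j : Int)));
       if ts.all (fun t => t.sum = tot) then some (acc ++ ts) else none) := by
  induction hn : lst.length - ind using Nat.strong_induction_on generalizing ind c acc with
  | _ n ih =>
  subst hn
  rw [get_is_sol_loop]
  by_cases h : ind + 2 ≤ lst.length
  · rw [if_pos h]
    have hkeq : (lst.length - ind) / 2 = (lst.length - (ind + 2)) / 2 + 1 := by omega
    have hcons : (List.range ((lst.length - ind) / 2)).map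
          (fun (j : Nat) => pvTriple lst ((ind : Int) + 2 * (j : Int)))
        = pvTriple lst (ind : Int) ::
          (List.range ((lst.length - (ind + 2)) / 2)).map
            (fun (j : Nat) => pvTriple lst (((ind + 2 : Nat) : Int) + 2 * (j : Int))) := by
      rw [hkeq, List.range_succ_eq_map, List.map_cons, List.map_map]
      refine congrArg₂ List.cons (by norm_num) ?_
      apply List.map_congr_left
      intro j _
      simp only [Function.comp_apply]
      congr 1
      push_cast
      ring
    set c' := if (ind : Int) + 2 < (lst.length : Int) then PySem.List.pyGetD lst ((ind : Int) + 2) 0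
              else PySem.List.pyGetD lst 1 0 with hc'
    have htr : pvTriple lst (ind : Int)
        = [PySem.List.pyGetD lst ((ind : Int) + 1) 0, PySem.List.pyGetD lst (ind : Int) 0, c'] := by
      rw [pvTriple]
    have hrec := ih (lst.length - (ind + 2)) (by omega) (ind + 2) c'
      (acc ++ [[PySem.List.pyGetD lst ((ind : Int) + 1) 0, c, c']])
      (by intro hle
          rw [hc']
          rw [if_pos (by push_cast; omega)]
          norm_num) rfl
    simp only at hrec ⊢
    rw [hcons, htr, hc h]
    by_cases hfail : PySem.List.pyGetD lst ((ind : Int) + 1) 0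
        + PySem.List.pyGetD lst (ind : Int) 0 + c' ≠ tot
    · rw [if_pos hfail]
      have hbad : decide (([PySem.List.pyGetD lst ((ind : Int) + 1) 0,
          PySem.List.pyGetD lst (ind : Int) 0, c'].sum = tot)) = false := by
        simp only [List.sum_cons, List.sum_nil, decide_eq_false_iff_not]
        omega
      rw [List.all_cons, hbad, Bool.false_and, if_neg (by simp)]
    · rw [if_neg hfail]
      rw [ne_eq, not_not] at hfail
      rw [hc h] at hrec
      rw [hrec]
      have hgood : decide (([PySem.List.pyGetD lst ((ind : Int) + 1) 0,
          PySem.List.pyGetD lst (ind : Int) 0, c'].sum = tot)) = true := by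
        simp only [List.sum_cons, List.sum_nil, decide_eq_true_eq]
        omega
      rw [List.all_cons, hgood, Bool.true_and]
      simp only [List.append_assoc, List.singleton_append]
  · rw [if_neg h]
    have hk0 : (lst.length - ind) / 2 = 0 := by omega
    simp [hk0]

-- ===== VERDICT (by name: the statement is the Claim_ definition above) =====
theorem get_is_sol_spec : Claim_equal_get_is_sol := by
  intro lst _ hpre
  unfold Spec_get_is_sol get_is_sol get_is_sol_alt
  have hlen : 3 ≤ lst.length := hpre
  have hk : (PySem.Int.floordiv ((lst.length : Int) - 2) 2).toNat = (lst.length - 2) / 2 := by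
    have h1 : PySem.Int.floordiv ((lst.length : Int) - 2) 2
        = (((lst.length - 2) / 2 : Nat) : Int) := by
      have h2 : ((lst.length : Int) - 2) = (((lst.length - 2 : Nat) : Int)) := by omega
      rw [h2]
      simp only [PySem.Int.floordiv]
      rw [Int.fdiv_eq_ediv, if_pos (Or.inl (by norm_num))]
      omega
    rw [h1]
    omega
  have hA := loop_eq lst
    (PySem.List.pyGetD lst 0 0 + PySem.List.pyGetD lst 1 0 + PySem.List.pyGetD lst 2 0)
    2 (PySem.List.pyGetD lst 2 0)
    [[PySem.List.pyGetD lst 0 0, PySem.List.pyGetD lst 1 0, PySem.List.pyGetD lst 2 0]]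
    (by intro _; norm_num)
  have hB := solve_eq lst
    (PySem.List.pyGetD lst 0 0 + PySem.List.pyGetD lst 1 0 + PySem.List.pyGetD lst 2 0)
    ((lst.length - 2) / 2) 2
  simp only [Nat.cast_ofNat] at hA hB ⊢
  rw [hA, hk, hB]
  by_cases hall : ((List.range ((lst.length - 2) / 2)).map
        (fun (j : Nat) => pvTriple lst ((2 : Int) + 2 * (j : Int)))).all
      (fun t => t.sum = PySem.List.pyGetD lst 0 0 + PySem.List.pyGetD lst 1 0
        + PySem.List.pyGetD lst 2 0) = true
  · rw [if_pos hall, if_pos hall]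
    simp
  · rw [if_neg hall, if_neg hall]
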